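-- pv_equiv track=rewrite | github.com/debipe20/coding-practice | src/amazon/systems-development-engineer-tech-deploy-systems-integration/jump-to-the-end.py | max_jumps_to_end
-- ===== SOURCE A (Python) =====
-- def max_jumps_to_end(arr):
--     n = len(arr)
--     memo = {}
--
--     def dfs(i):
--         if i == n - 1:
--             return 0  # Reached end, no more jumps
--         if i in memo:
--             return memo[i]
--
--         max_jumps = -1  # Start with invalid case
--         for j in range(i + 1, min(n, i + 1 + arr[i])): #j ranges from i+1 to (i+1 + arr[i]) (but not exceeding n).
--             sub_jumps = dfs(j) #Recursively compute max jumps needed from index j.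
--             if sub_jumps != -1: #If none of the jumps from position i lead to a valid solution, then max_jumps stays -1.
--                 max_jumps = max(max_jumps, 1 + sub_jumps) # If we can reach the end from j, update the max jumps at index i. 1 + sub_jumps: one jump to reach j, plus whatever it takes from there to the end.
--
--         memo[i] = max_jumps
--         return max_jumps
--
--     result = dfs(0)
--     return result
-- ===== SOURCE B (Python) =====
-- def max_jumps_to_end(arr):
--     # O(n) right-to-left greedy: to maximise jumps, always jump to the nearest
--     # index that can still reach the end; track only that index and its count.
--     n = len(arr)
--     nr, cnt = n - 1, 0  # nearest end-reaching index seen so far, and its jump count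
--     for i in range(n - 2, -1, -1):
--         if arr[i] >= nr - i:  # nearest end-reaching index lies inside i's window
--             nr, cnt = i, cnt + 1
--     return cnt if nr == 0 else -1
-- ===== Notes on version B (the rewrite author's own statement) =====
-- stated objective: faster
-- what changed: Replaced A's memoized top-down DFS over every jump target (a dict-backed recursion scanning up to arr[i] successors per index) with a single right-to-left greedy pass that keeps only the nearest end-reaching index and its jump count, using the fact that among end-reaching indices the maximal jump count strictly decreases to the right.
import Mathlib
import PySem

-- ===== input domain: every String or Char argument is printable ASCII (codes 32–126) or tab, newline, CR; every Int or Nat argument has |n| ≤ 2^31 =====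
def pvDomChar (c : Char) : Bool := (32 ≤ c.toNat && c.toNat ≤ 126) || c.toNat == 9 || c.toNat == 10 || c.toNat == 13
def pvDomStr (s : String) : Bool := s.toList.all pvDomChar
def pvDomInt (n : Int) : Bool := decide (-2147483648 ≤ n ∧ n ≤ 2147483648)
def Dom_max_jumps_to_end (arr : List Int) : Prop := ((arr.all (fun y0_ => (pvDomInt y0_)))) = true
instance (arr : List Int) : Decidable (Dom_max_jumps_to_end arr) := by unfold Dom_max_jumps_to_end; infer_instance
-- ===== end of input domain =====

-- B replaces A's memoized top-down search with a right-to-left greedy that keeps only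
-- the nearest end-reaching index and its jump count (a different algorithm, no memo table).

-- ===== PORT A =====
-- helper: A's inner `dfs`, memo dict threaded through; `fuel` only makes the
-- recursion structurally terminating (the supplied fuel is never exhausted).
-- arr[i] is always in range at its use site, so pyGetD is exact (default never used).
def dfsA (arr : List Int) (n : Int) : Nat → Int → PySem.Dict Int Int → Int × PySem.Dict Int Int
  | 0, _, memo => (-1, memo)
  | fuel+1, i, memo =>
      if i = n - 1 then (0, memo)
      else
        match memo.get? i with
        | some v => (v, memo)
        | none =>
            -- for j in range(i+1, min(n, i+1+arr[i])): sub_jumps = dfs(j); if != -1: max(...)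
            let p := (PySem.List.pyRange (i+1) (min n (i+1 + PySem.List.pyGetD arr i 0)) 1).foldl
              (fun (acc : Int × PySem.Dict Int Int) j =>
                if (dfsA arr n fuel j acc.2).1 ≠ -1 then
                  (max acc.1 (1 + (dfsA arr n fuel j acc.2).1), (dfsA arr n fuel j acc.2).2)
                else (acc.1, (dfsA arr n fuel j acc.2).2))
              (-1, memo)
            (p.1, p.2.insert i p.1)

def max_jumps_to_end (arr : List Int) : Int :=
  (dfsA arr (arr.length : Int) (arr.length + 1) 0 PySem.Dict.empty).1

-- ===== PORT B =====
def max_jumps_to_end_alt (arr : List Int) : Int :=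
  let n : Int := (arr.length : Int)
  let st := (PySem.List.pyRange (n - 2) (-1) (-1)).foldl
      (fun (st : Int × Int) i =>
        if PySem.List.pyGetD arr i 0 ≥ st.1 - i then (i, st.2 + 1) else st)
      (n - 1, 0)
  if st.1 = 0 then st.2 else -1

-- ===== PRECONDITION & SPEC =====
-- A raises IndexError on the empty list (dfs(0) indexes the first element); Pre_ excludes exactly that.
def Pre_max_jumps_to_end (arr : List Int) : Prop := arr ≠ []
instance (arr : List Int) : Decidable (Pre_max_jumps_to_end arr) := by unfold Pre_max_jumps_to_end; infer_instance
def pvWitness_max_jumps_to_end : List Int := ([2, 1, 0] : List Int)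

def Spec_max_jumps_to_end (arr : List Int) (out : Int) : Prop := out = max_jumps_to_end_alt arr
instance (arr : List Int) (out : Int) : Decidable (Spec_max_jumps_to_end arr out) := by unfold Spec_max_jumps_to_end; infer_instance

-- ===== CLAIM (what is proved, stated in full; the proofs are below) =====
def Claim_equal_max_jumps_to_end : Prop := ∀ (arr : List Int), Dom_max_jumps_to_end arr → Pre_max_jumps_to_end arr → Spec_max_jumps_to_end arr (max_jumps_to_end arr)

-- ===== LEMMAS AND PROOFS =====

-- the window of indices reachable from i in one jump, as natural numbers
def gwin (arr : List Int) (i : Nat) : List Nat :=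
  List.range' (i+1) ((min (arr.length : Int) ((i : Int) + 1 + arr.getD i 0) - ((i : Int) + 1)).toNat)

lemma mem_gwin {arr : List Int} {i j : Nat} (h : j ∈ gwin arr i) :
    i < j ∧ j < arr.length ∧ (j : Int) < min (arr.length : Int) ((i : Int) + 1 + arr.getD i 0) := by
  simp only [gwin, List.mem_range'_1] at h
  obtain ⟨h1, h2⟩ := h
  have hM := min_le_left (arr.length : Int) ((i : Int) + 1 + arr.getD i 0)
  revert h1 h2 hM
  generalize min (arr.length : Int) ((i : Int) + 1 + arr.getD i 0) = M
  intro h1 h2 hM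
  omega

lemma mem_gwin_of {arr : List Int} {i j : Nat} (h1 : i < j)
    (h2 : (j : Int) < min (arr.length : Int) ((i : Int) + 1 + arr.getD i 0)) : j ∈ gwin arr i := by
  simp only [gwin, List.mem_range'_1]
  revert h1 h2
  generalize min (arr.length : Int) ((i : Int) + 1 + arr.getD i 0) = M
  intro h1 h2
  omega

-- the spec: maximum number of jumps from index i to the last index (-1 if unreachable)
def g (arr : List Int) (i : Nat) : Int :=
  if i + 1 = arr.length then 0
  else (gwin arr i).attach.foldl
    (fun m j => if g arr j.1 ≠ -1 then max m (1 + g arr j.1) else m) (-1)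
termination_by arr.length - i
decreasing_by
  have := mem_gwin j.2
  omega

-- the fold A's inner loop performs, over Nat indices
def F (arr : List Int) (l : List Nat) (m : Int) : Int :=
  l.foldl (fun m j => if g arr j ≠ -1 then max m (1 + g arr j) else m) m

lemma g_eq {arr : List Int} {i : Nat} (h : i + 1 ≠ arr.length) :
    g arr i = F arr (gwin arr i) (-1) := by
  rw [g]
  simp only [h, if_false, F]
  exact List.foldl_attach (f := fun m j => if g arr j ≠ -1 then max m (1 + g arr j) else m)
    (b := -1)

lemma F_init_le (arr : List Int) (l : List Nat) (m : Int) : m ≤ F arr l m := by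
  induction l generalizing m with
  | nil => simp [F]
  | cons x t ih =>
      simp only [F, List.foldl_cons]
      refine le_trans ?_ (ih _)
      split <;> simp

lemma F_le_mem (arr : List Int) {l : List Nat} {j : Nat} (hj : j ∈ l) (hne : g arr j ≠ -1)
    (m : Int) : 1 + g arr j ≤ F arr l m := by
  induction l generalizing m with
  | nil => cases hj
  | cons x t ih =>
      simp only [F, List.foldl_cons]
      rcases List.mem_cons.1 hj with rfl | hj'
      · rw [if_pos hne]
        refine le_trans ?_ (F_init_le arr t _)
        exact le_max_right _ _
      · exact ih hj' _

lemma F_shape (arr : List Int) (l : List Nat) (m : Int) :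
    F arr l m = m ∨ ∃ j ∈ l, g arr j ≠ -1 ∧ F arr l m = 1 + g arr j := by
  induction l generalizing m with
  | nil => left; rfl
  | cons x t ih =>
      simp only [F, List.foldl_cons]
      by_cases hx : g arr x ≠ -1
      · rw [if_pos hx]
        rcases ih (max m (1 + g arr x)) with h | ⟨j, hj, hne, he⟩
        · rcases max_choice m (1 + g arr x) with hm | hm
          · left; rw [F] at h; rw [h, hm]
          · right; exact ⟨x, List.mem_cons_self, hx, by rw [F] at h; rw [h, hm]⟩
        · right; exact ⟨j, List.mem_cons_of_mem _ hj, hne, by rw [F] at he; rw [he]⟩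
      · rw [if_neg hx]
        rcases ih m with h | ⟨j, hj, hne, he⟩
        · left; rw [F] at h; exact h
        · right; exact ⟨j, List.mem_cons_of_mem _ hj, hne, by rw [F] at he; rw [he]⟩

lemma F_all_neg (arr : List Int) {l : List Nat} (h : ∀ j ∈ l, g arr j = -1) (m : Int) :
    F arr l m = m := by
  induction l generalizing m with
  | nil => rfl
  | cons x t ih =>
      simp only [F, List.foldl_cons, h x List.mem_cons_self]
      simp only [ne_eq, not_true_eq_false, if_false]
      exact ih (fun j hj => h j (List.mem_cons_of_mem _ hj)) m

lemma g_nonneg (arr : List Int) : ∀ (d i : Nat), arr.length - i ≤ d → g arr i ≠ -1 → 0 ≤ g arr i := by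
  intro d
  induction d with
  | zero =>
      intro i hd hne
      by_cases h : i + 1 = arr.length
      · rw [g, if_pos h]
      · exfalso
        rw [g_eq h] at hne
        rcases F_shape arr (gwin arr i) (-1) with hs | ⟨j, hj, _, _⟩
        · exact hne hs
        · have := mem_gwin hj; omega
  | succ d ih =>
      intro i hd hne
      by_cases h : i + 1 = arr.length
      · rw [g, if_pos h]
      · rw [g_eq h] at hne ⊢
        rcases F_shape arr (gwin arr i) (-1) with hs | ⟨j, hj, hjne, he⟩
        · exact absurd hs hne
        · have hm := mem_gwin hj
          have := ih j (by omega) hjne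
          omega

-- valid g-values strictly decrease to the right: this is why the greedy can always
-- jump to the NEAREST end-reaching index
lemma g_mono (arr : List Int) : ∀ (d j k : Nat), arr.length - j ≤ d → j < k → k < arr.length →
    g arr j ≠ -1 → g arr k ≠ -1 → 1 + g arr k ≤ g arr j := by
  intro d
  induction d with
  | zero => intro j k hd hjk hk _ _; omega
  | succ d ih =>
      intro j k hd hjk hk hj hkne
      have hne : j + 1 ≠ arr.length := by omega
      rw [g_eq hne] at hj ⊢
      rcases F_shape arr (gwin arr j) (-1) with hs | ⟨j', hj', hj'ne, he⟩
      · exact absurd hs hj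
      · have hm := mem_gwin hj'
        rcases lt_trichotomy j' k with hlt | rfl | hgt
        · have h2 := ih j' k (by omega) hlt hk hj'ne hkne
          have h3 := g_nonneg arr (arr.length) k (by omega) hkne
          omega
        · rw [he]
        · -- k itself lies in j's window (it is below j'); use the lower bound
          have hkmem : k ∈ gwin arr j := mem_gwin_of hjk (by
            have h3 := hm.2.2
            revert h3 hgt
            generalize min (arr.length : Int) ((j : Int) + 1 + arr.getD j 0) = M
            intro h3 hgt
            omega)
          exact F_le_mem arr hkmem hkne (-1)

-- ==== A-side: the memoized dfs computes g ====

def MInv (arr : List Int) (memo : PySem.Dict Int Int) : Prop :=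
  ∀ (k v : Int), memo.get? k = some v → 0 ≤ k ∧ v = g arr k.toNat

lemma MInv_empty (arr : List Int) : MInv arr PySem.Dict.empty := by
  intro k v h
  simp [PySem.Dict.get?_empty] at h

lemma pyRange_one_map_range' : ∀ (c : Nat) (a b : Int), 0 ≤ a → (b - a).toNat = c →
    PySem.List.pyRange a b 1 = (List.range' a.toNat c).map (fun (j : Nat) => (j : Int)) := by
  intro c
  induction c with
  | zero =>
      intro a b ha hc
      rw [PySem.List.pyRange_one_eq_nil (by omega)]
      simp
  | succ c ih =>
      intro a b ha hc
      rw [PySem.List.pyRange_one_cons (by omega), List.range'_succ]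
      simp only [List.map_cons, Int.toNat_of_nonneg ha, List.cons.injEq, true_and]
      rw [ih (a+1) b (by omega) (by omega), show (a+1).toNat = a.toNat + 1 by omega]

lemma gwin_cast (arr : List Int) (k : Nat) :
    PySem.List.pyRange ((k : Int) + 1) (min (arr.length : Int) ((k : Int) + 1 + PySem.List.pyGetD arr (k : Int) 0)) 1
      = (gwin arr k).map (fun (j : Nat) => (j : Int)) := by
  rw [PySem.List.pyGetD_natCast]
  rw [pyRange_one_map_range' _ ((k : Int) + 1) _ (by omega) rfl]
  congr 1

lemma dfs_correct (arr : List Int) : ∀ (fuel : Nat) (k : Nat) (memo : PySem.Dict Int Int),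
    k < arr.length → arr.length - k ≤ fuel → MInv arr memo →
    (dfsA arr (arr.length : Int) fuel (k : Int) memo).1 = g arr k ∧
      MInv arr (dfsA arr (arr.length : Int) fuel (k : Int) memo).2 := by
  intro fuel
  induction fuel with
  | zero => intro k memo hn hf _; omega
  | succ fuel ih =>
      intro k memo hn hf hm
      by_cases hend : (k : Int) = (arr.length : Int) - 1
      · have hk1 : k + 1 = arr.length := by omega
        simp only [dfsA, if_pos hend]
        exact ⟨(by rw [g, if_pos hk1]), hm⟩
      · have hne : k + 1 ≠ arr.length := by omega
        cases hget : memo.get? (k : Int) with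
        | some v =>
            simp only [dfsA, if_neg hend, hget]
            obtain ⟨_, hv⟩ := hm (k : Int) v hget
            simp only [Int.toNat_natCast] at hv
            exact ⟨hv, hm⟩
        | none =>
            simp only [dfsA, if_neg hend, hget, gwin_cast arr k]
            have inner : ∀ (l : List Nat) (m : Int) (d : PySem.Dict Int Int), MInv arr d →
                (∀ j ∈ l, k < j ∧ j < arr.length) →
                ((l.map (fun (j : Nat) => (j : Int))).foldl
                  (fun (acc : Int × PySem.Dict Int Int) j =>
                    if (dfsA arr (arr.length : Int) fuel j acc.2).1 ≠ -1 then
                      (max acc.1 (1 + (dfsA arr (arr.length : Int) fuel j acc.2).1),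
                        (dfsA arr (arr.length : Int) fuel j acc.2).2)
                    else (acc.1, (dfsA arr (arr.length : Int) fuel j acc.2).2))
                  (m, d)).1 = F arr l m ∧
                MInv arr ((l.map (fun (j : Nat) => (j : Int))).foldl
                  (fun (acc : Int × PySem.Dict Int Int) j =>
                    if (dfsA arr (arr.length : Int) fuel j acc.2).1 ≠ -1 then
                      (max acc.1 (1 + (dfsA arr (arr.length : Int) fuel j acc.2).1),
                        (dfsA arr (arr.length : Int) fuel j acc.2).2)
                    else (acc.1, (dfsA arr (arr.length : Int) fuel j acc.2).2))
                  (m, d)).2 := by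
              intro l
              induction l with
              | nil => intro m d hd _; exact ⟨rfl, hd⟩
              | cons x t iht =>
                  intro m d hd hb
                  have hx := hb x List.mem_cons_self
                  have hcall := ih x d hx.2 (by omega) hd
                  simp only [List.map_cons, List.foldl_cons, hcall.1]
                  by_cases hgx : g arr x ≠ -1
                  · rw [if_pos hgx]
                    have hrest := iht (max m (1 + g arr x)) _ hcall.2
                      (fun j hj => hb j (List.mem_cons_of_mem _ hj))
                    refine ⟨?_, hrest.2⟩
                    rw [hrest.1]
                    simp [F, hgx]
                  · rw [if_neg hgx]
                    have hgx' : g arr x = -1 := not_not.mp hgx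
                    have hrest := iht m _ hcall.2 (fun j hj => hb j (List.mem_cons_of_mem _ hj))
                    refine ⟨?_, hrest.2⟩
                    rw [hrest.1]
                    simp [F, hgx']
            have hb : ∀ j ∈ gwin arr k, k < j ∧ j < arr.length := by
              intro j hj
              have := mem_gwin hj
              exact ⟨this.1, this.2.1⟩
            obtain ⟨h1, h2⟩ := inner (gwin arr k) (-1) memo hm hb
            refine ⟨by rw [h1, g_eq hne], ?_⟩
            intro k' v' hkv
            rw [PySem.Dict.get?_insert] at hkv
            split_ifs at hkv with hk'
            · subst hk'
              refine ⟨by omega, ?_⟩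
              simp only [Option.some.injEq] at hkv
              simp only [Int.toNat_natCast]
              rw [← hkv, h1, g_eq hne]
            · exact h2 k' v' hkv

-- ==== B-side: the greedy fold computes g 0 ====

def stepB (arr : List Int) : Int × Int → Int → Int × Int :=
  fun st i => if PySem.List.pyGetD arr i 0 ≥ st.1 - i then (i, st.2 + 1) else st

def GInv (arr : List Int) (t : Nat) (st : Int × Int) : Prop :=
  ∃ r : Nat, st.1 = (r : Int) ∧ t ≤ r ∧ r < arr.length ∧ g arr r ≠ -1 ∧ st.2 = g arr r ∧
    ∀ j : Nat, t ≤ j → j < r → g arr j = -1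

-- one step of the greedy preserves the invariant
lemma step_inv (arr : List Int) (t : Nat) (st : Int × Int) (h : GInv arr (t+1) st) :
    GInv arr t (stepB arr st (t : Int)) := by
  obtain ⟨r, hr1, hr2, hr3, hr4, hr5, hr6⟩ := h
  have hne : t + 1 ≠ arr.length := by omega
  have hgd : PySem.List.pyGetD arr (t : Int) 0 = arr.getD t 0 := PySem.List.pyGetD_natCast arr t 0
  unfold stepB
  by_cases hc : PySem.List.pyGetD arr (t : Int) 0 ≥ st.1 - (t : Int)
  · rw [if_pos hc]
    rw [hr1, hgd] at hc
    -- r is in t's window, and it is the nearest valid index, so g t = 1 + g r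
    have hrm1 : (r : Int) < (arr.length : Int) := by omega
    have hrm2 : (r : Int) < (t : Int) + 1 + arr.getD t 0 := by omega
    have hrmem : r ∈ gwin arr t := mem_gwin_of (by omega) (lt_min hrm1 hrm2)
    have hlow : 1 + g arr r ≤ g arr t := by
      rw [g_eq hne]
      exact F_le_mem arr hrmem hr4 (-1)
    have hup : g arr t ≤ 1 + g arr r := by
      rw [g_eq hne]
      rcases F_shape arr (gwin arr t) (-1) with hs | ⟨j, hj, hjne, he⟩
      · rw [hs]
        have := g_nonneg arr arr.length r (by omega) hr4
        omega
      · have hm := mem_gwin hj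
        rcases lt_trichotomy j r with hlt | rfl | hgt
        · exact absurd (hr6 j (by omega) hlt) hjne
        · omega
        · have := g_mono arr arr.length r j (by omega) hgt hm.2.1 hr4 hjne
          omega
    have hgt : g arr t = 1 + g arr r := le_antisymm hup hlow
    have hnn := g_nonneg arr arr.length r (by omega) hr4
    exact ⟨t, rfl, le_refl t, by omega, by rw [hgt]; omega, by rw [hgt, hr5]; omega,
      fun j h1 h2 => absurd h2 (by omega)⟩
  · rw [if_neg hc]
    rw [hr1, hgd] at hc
    -- no valid index in t's window: every window member is left of r, hence invalid
    have hgtneg : g arr t = -1 := by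
      rw [g_eq hne]
      apply F_all_neg
      intro j hj
      have hj1 := (mem_gwin hj).1
      have hm := (mem_gwin hj).2.2
      have hMr := min_le_right (arr.length : Int) ((t : Int) + 1 + arr.getD t 0)
      exact hr6 j (by omega) (by omega)
    refine ⟨r, hr1, by omega, hr3, hr4, hr5, ?_⟩
    intro j h1 h2
    rcases Nat.eq_or_lt_of_le h1 with rfl | h1'
    · exact hgtneg
    · exact hr6 j (by omega) h2

lemma fold_inv (arr : List Int) : ∀ (t : Nat) (st : Int × Int), t + 1 ≤ arr.length →
    GInv arr (t+1) st →
    GInv arr 0 ((PySem.List.pyRange (t : Int) (-1) (-1)).foldl (stepB arr) st) := by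
  intro t
  induction t with
  | zero =>
      intro st h1 h2
      rw [PySem.List.pyRange_neg_one_cons (by omega), PySem.List.pyRange_neg_one_eq_nil (by omega)]
      simp only [List.foldl_cons, List.foldl_nil, Nat.cast_zero]
      exact step_inv arr 0 st h2
  | succ t ih =>
      intro t' h1 h2
      rw [show ((t+1 : Nat) : Int) = ((t : Nat) : Int) + 1 by push_cast; ring,
        PySem.List.pyRange_neg_one_cons (by omega)]
      simp only [List.foldl_cons, add_sub_cancel_right]
      have hstep : GInv arr (t+1) (stepB arr t' (((t+1 : Nat)) : Int)) := step_inv arr (t+1) t' h2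
      have hcast : (((t+1 : Nat)) : Int) = ((t : Nat) : Int) + 1 := by push_cast; ring
      rw [hcast] at hstep
      exact ih (stepB arr t' (((t : Nat) : Int) + 1)) (by omega) hstep

lemma alt_eq_g (arr : List Int) (h : arr ≠ []) : max_jumps_to_end_alt arr = g arr 0 := by
  have hn : 1 ≤ arr.length := List.length_pos_of_ne_nil h
  show (if ((PySem.List.pyRange ((arr.length : Int) - 2) (-1) (-1)).foldl (stepB arr)
      ((arr.length : Int) - 1, 0)).1 = 0
    then ((PySem.List.pyRange ((arr.length : Int) - 2) (-1) (-1)).foldl (stepB arr)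
      ((arr.length : Int) - 1, 0)).2 else -1) = g arr 0
  by_cases h1 : arr.length = 1
  · rw [PySem.List.pyRange_neg_one_eq_nil (by omega)]
    simp only [List.foldl_nil, h1]
    norm_num
    rw [g, if_pos (by omega)]
  · have h2 : 2 ≤ arr.length := by omega
    have hbase : GInv arr (arr.length - 2 + 1) ((arr.length : Int) - 1, 0) := by
      refine ⟨arr.length - 1, by push_cast; omega, by omega, by omega, ?_, ?_, ?_⟩
      · rw [g, if_pos (by omega)]; decide
      · rw [g, if_pos (by omega)]
      · intro j hj1 hj2; omega
    have hfold := fold_inv arr (arr.length - 2) ((arr.length : Int) - 1, 0) (by omega) hbase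
    rw [show ((arr.length : Int) - 2) = (((arr.length - 2 : Nat)) : Int) by omega]
    obtain ⟨r, hr1, _, hr3, hr4, hr5, hr6⟩ := hfold
    by_cases hz : ((PySem.List.pyRange (((arr.length - 2 : Nat)) : Int) (-1) (-1)).foldl (stepB arr)
        ((arr.length : Int) - 1, 0)).1 = 0
    · rw [if_pos hz]
      have hr0 : r = 0 := by rw [hr1] at hz; omega
      subst hr0
      exact hr5
    · rw [if_neg hz]
      have hrpos : 0 < r := by
        rcases Nat.eq_zero_or_pos r with rfl | h'
        · exact absurd (by rw [hr1]; rfl) hz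
        · exact h'
      rw [hr6 0 (Nat.zero_le _) hrpos]

lemma a_eq_g (arr : List Int) (h : arr ≠ []) : max_jumps_to_end arr = g arr 0 := by
  have hn : 1 ≤ arr.length := List.length_pos_of_ne_nil h
  have hd := dfs_correct arr (arr.length + 1) 0 PySem.Dict.empty (by omega) (by omega)
    (MInv_empty arr)
  unfold max_jumps_to_end
  rw [show (0 : Int) = ((0 : Nat) : Int) by norm_num]
  exact hd.1

-- ===== VERDICT (by name: the statement is the Claim_ definition above) =====
theorem max_jumps_to_end_spec : Claim_equal_max_jumps_to_end := by
  intro arr _ hpre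
  unfold Spec_max_jumps_to_end
  rw [a_eq_g arr hpre, alt_eq_g arr hpre]
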